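-- pv_equiv track=rewrite | github.com/polaschwoebel/evolution_and_music | evaluation_wheel.py | transcribe_input
-- ===== SOURCE A (Python) =====
-- def transcribe_input(input_string):
--     score = 0
--     for i in input_string:
--         if i == '-':
--             score -= 1
--         if i == '+' or i == '=':
--             score += 1
--     return score
-- ===== SOURCE B (Python) =====
-- def transcribe_input(input_string):
--     # Divide and conquer: split the string in halves down to single
--     # characters, score each character, and add the subtree scores.
--     if len(input_string) == 0:
--         return 0
--     if len(input_string) == 1:
--         if input_string in '+=':
--             return 1
--         if input_string == '-':
--             return -1
--         return 0
--     mid = len(input_string) // 2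
--     return transcribe_input(input_string[:mid]) + transcribe_input(input_string[mid:])
-- ===== Notes on version B (the rewrite author's own statement) =====
-- stated objective: alternative
-- what changed: A's single left-to-right loop with a running accumulator is replaced by a divide-and-conquer tree recursion: the string is split in halves down to single characters, each scored independently, and the subtree scores summed (correct because the score is a sum over characters, hence associative over concatenation).
import Mathlib
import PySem

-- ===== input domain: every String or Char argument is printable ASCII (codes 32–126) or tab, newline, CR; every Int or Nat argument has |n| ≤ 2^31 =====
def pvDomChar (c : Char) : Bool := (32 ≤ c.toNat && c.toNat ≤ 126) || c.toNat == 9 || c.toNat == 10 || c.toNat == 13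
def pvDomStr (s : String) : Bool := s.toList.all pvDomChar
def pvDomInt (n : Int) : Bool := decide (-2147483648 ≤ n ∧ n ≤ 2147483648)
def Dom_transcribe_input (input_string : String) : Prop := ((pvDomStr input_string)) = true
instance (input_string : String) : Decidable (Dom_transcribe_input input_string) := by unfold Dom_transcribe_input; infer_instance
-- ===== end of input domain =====

-- B replaces A's accumulating left-to-right loop with a divide-and-conquer tree recursion
-- (split in halves, score single characters, add subtree scores) — objective: alternative.

-- ===== PORT A =====
-- literal port of A: a single fold carrying the running score, branches in source order
def transcribe_input (input_string : String) : Int :=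
  input_string.toList.foldl
    (fun score i =>
      let score := if i == '-' then score - 1 else score
      if i == '+' || i == '=' then score + 1 else score)
    0

-- ===== PORT B =====
-- literal port of B's divide-and-conquer recursion over the character list
-- (s[:mid] / s[mid:] are List.take / List.drop at mid = length/2, exact for this index)
def tiHalves (l : List Char) : Int :=
  if _h0 : l.length = 0 then 0
  else if _h1 : l.length = 1 then
    -- single character: `input_string in '+='` / `== '-'`
    let c := l.headD ' '
    if c == '+' || c == '=' then 1 else if c == '-' then -1 else 0
  else
    tiHalves (l.take (l.length / 2)) + tiHalves (l.drop (l.length / 2))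
termination_by l.length
decreasing_by
  · simp only [List.length_take]; omega
  · simp only [List.length_drop]; omega

def transcribe_input_alt (input_string : String) : Int :=
  tiHalves input_string.toList

-- ===== PRECONDITION & SPEC =====
def Spec_transcribe_input (input_string : String) (out : Int) : Prop := out = transcribe_input_alt input_string
instance (input_string : String) (out : Int) : Decidable (Spec_transcribe_input input_string out) := by unfold Spec_transcribe_input; infer_instance

-- ===== CLAIM (what is proved, stated in full; the proofs are below) =====
def Claim_equal_transcribe_input : Prop := ∀ (input_string : String), Dom_transcribe_input input_string → Spec_transcribe_input input_string (transcribe_input input_string)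

-- ===== LEMMAS AND PROOFS =====

-- both sides equal the same closed form: count '+' + count '=' - count '-'
def charScore (l : List Char) : Int :=
  (l.count '+' : Int) + (l.count '=' : Int) - (l.count '-' : Int)

theorem tiHalves_nil : tiHalves [] = 0 := by rw [tiHalves]; rfl

theorem tiHalves_single (c : Char) :
    tiHalves [c] = if c == '+' || c == '=' then 1 else if c == '-' then -1 else 0 := by
  rw [tiHalves]; rfl

theorem tiHalves_eq (l : List Char) : tiHalves l = charScore l := by
  induction hn : l.length using Nat.strong_induction_on generalizing l with
  | _ n ih =>
  by_cases h0 : l.length = 0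
  · have : l = [] := List.eq_nil_of_length_eq_zero h0
    subst this; simp [tiHalves_nil, charScore]
  · by_cases h1 : l.length = 1
    · match l, h1 with
      | [c], _ =>
        by_cases hp : c = '+' <;> by_cases he : c = '=' <;> by_cases hm : c = '-' <;>
          simp_all [tiHalves_single, charScore, List.count_cons] <;> omega
    · rw [tiHalves, dif_neg h0, dif_neg h1]
      subst hn
      rw [ih (l.take (l.length / 2)).length (by simp; omega) _ rfl,
          ih (l.drop (l.length / 2)).length (by simp; omega) _ rfl]
      have hsplit : l.take (l.length / 2) ++ l.drop (l.length / 2) = l := List.take_append_drop _ _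
      have := congrArg charScore hsplit
      simp only [charScore, List.count_append] at this ⊢
      push_cast at this ⊢
      omega

theorem foldl_score (l : List Char) : ∀ (a : Int),
    l.foldl
      (fun score i =>
        let score := if i == '-' then score - 1 else score
        if i == '+' || i == '=' then score + 1 else score)
      a
    = a + charScore l := by
  induction l with
  | nil => intro a; simp [charScore]
  | cons x t ih =>
    intro a
    simp only [List.foldl_cons, ih]
    by_cases h1 : x = '+' <;> by_cases h2 : x = '=' <;> by_cases h3 : x = '-' <;>
      simp_all [charScore, List.count_cons] <;> ring

-- ===== VERDICT (by name: the statement is the Claim_ definition above) =====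
theorem transcribe_input_spec : Claim_equal_transcribe_input := by
  intro s _
  show transcribe_input s = transcribe_input_alt s
  unfold transcribe_input transcribe_input_alt
  rw [foldl_score, tiHalves_eq, zero_add]
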